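-- pv_equiv track=rewrite | github.com/swoooon/PS_BOJ | 백준/Gold/1022. 소용돌이 예쁘게 출력하기/소용돌이 예쁘게 출력하기.py | f
-- ===== SOURCE A (Python) =====
-- def f(x, y):
--     if x == 0 and y == 0: return 1
--     k = max(abs(x), abs(y))
--     a = (2*k-1)*(2*k-1)
--     nx, ny = k, k
--     for i in range(2*k):
--         ny -= 1
--         a += 1
--         if y == ny and x == nx:
--             return a
--     for i in range(2*k):
--         a += 1
--         nx -= 1
--         if y == ny and x == nx:
--             return a
--     for i in range(2*k):
--         a += 1
--         ny += 1
--         if y == ny and x == nx: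
--             return a
--     for i in range(2*k):
--         a += 1
--         nx += 1
--         if y == ny and x == nx:
--             return a
-- ===== SOURCE B (Python) =====
-- def f(x, y):
--     if x == 0 and y == 0:
--         return 1
--     k = max(abs(x), abs(y))
--     a = (2 * k - 1) * (2 * k - 1)
--     if x == k and y < k:
--         return a + (k - y)
--     if y == -k:
--         return a + 2 * k + (k - x)
--     if x == -k:
--         return a + 4 * k + (k + y)
--     return a + 6 * k + (k + x)
-- ===== Notes on version B (the rewrite author's own statement) =====
-- stated objective: faster
-- what changed: replaces the four O(k) search loops around ring k with a direct side classification and an O(1) arithmetic offset from the ring's starting value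
import Mathlib
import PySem

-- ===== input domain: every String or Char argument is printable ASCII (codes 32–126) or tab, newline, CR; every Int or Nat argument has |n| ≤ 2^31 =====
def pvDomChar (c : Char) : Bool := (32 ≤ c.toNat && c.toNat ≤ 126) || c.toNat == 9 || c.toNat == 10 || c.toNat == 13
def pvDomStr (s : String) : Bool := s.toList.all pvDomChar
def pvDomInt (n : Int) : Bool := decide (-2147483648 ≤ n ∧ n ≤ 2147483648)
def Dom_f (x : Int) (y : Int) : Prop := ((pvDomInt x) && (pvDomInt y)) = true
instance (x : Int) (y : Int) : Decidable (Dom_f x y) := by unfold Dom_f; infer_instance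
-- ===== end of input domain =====

-- B replaces A's four O(k) search loops around ring k with a direct side
-- classification and an O(1) arithmetic offset from the ring's start value (objective: faster).


-- ===== PORT A =====
-- one Python 'for' loop of A: step (nx,ny) by (dx,dy), a += 1, early-return a on hit
-- (.inl a = the loop's 'return a'; .inr = loop exhausted, carrying the final nx, ny, a)
def loopA (x y dx dy : Int) : Nat → Int → Int → Int → Sum Int (Int × Int × Int)
  | 0, nx, ny, a => Sum.inr (nx, ny, a)
  | n + 1, nx, ny, a =>
    if y = ny + dy ∧ x = nx + dx then Sum.inl (a + 1)
    else loopA x y dx dy n (nx + dx) (ny + dy) (a + 1)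

def f (x : Int) (y : Int) : Int :=
  if x = 0 ∧ y = 0 then 1 else
  let k := max |x| |y|
  let a := (2 * k - 1) * (2 * k - 1)
  -- the four 'for i in range(2*k)' loops of A, chained (each may early-return)
  (loopA x y 0 (-1) (2 * k).toNat k k a).elim id (fun s =>
    (loopA x y (-1) 0 (2 * k).toNat s.1 s.2.1 s.2.2).elim id (fun s =>
      (loopA x y 0 1 (2 * k).toNat s.1 s.2.1 s.2.2).elim id (fun s =>
        (loopA x y 1 0 (2 * k).toNat s.1 s.2.1 s.2.2).elim id (fun _ =>
          0))))  -- Python falls off the end (None); unreachable since (x,y) lies on ring k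

-- ===== PORT B =====
def f_alt (x : Int) (y : Int) : Int :=
  if x = 0 ∧ y = 0 then 1 else
  let k := max |x| |y|
  let a := (2 * k - 1) * (2 * k - 1)
  if x = k ∧ y < k then a + (k - y)
  else if y = -k then a + 2 * k + (k - x)
  else if x = -k then a + 4 * k + (k + y)
  else a + 6 * k + (k + x)

-- ===== PRECONDITION & SPEC =====
def Spec_f (x : Int) (y : Int) (out : Int) : Prop := out = f_alt x y
instance (x : Int) (y : Int) (out : Int) : Decidable (Spec_f x y out) := by unfold Spec_f; infer_instance

-- ===== CLAIM (what is proved, stated in full; the proofs are below) =====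
def Claim_equal_f : Prop := ∀ (x : Int) (y : Int), Dom_f x y → Spec_f x y (f x y)

-- ===== LEMMAS AND PROOFS =====

-- loop going down in ny (dx = 0, dy = -1): hits exactly the y's in [ny-n, ny) on column nx
theorem loopA_down (x y : Int) : ∀ (n : Nat) (nx ny a : Int),
    loopA x y 0 (-1) n nx ny a =
      if x = nx ∧ ny - n ≤ y ∧ y < ny then Sum.inl (a + (ny - y))
      else Sum.inr (nx, ny - n, a + n) := by
  intro n
  induction n with
  | zero =>
    intro nx ny a
    simp only [loopA, Nat.cast_zero]
    rw [if_neg (by omega)]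
    norm_num
  | succ n ih =>
    intro nx ny a
    simp only [loopA]
    by_cases h : y = ny + (-1) ∧ x = nx + 0
    · rw [if_pos h, if_pos (by omega)]
      simp only [Sum.inl.injEq]; omega
    · rw [if_neg h, ih]
      by_cases h2 : x = nx + 0 ∧ ny + (-1) - n ≤ y ∧ y < ny + (-1)
      · rw [if_pos h2, if_pos (by omega)]
        simp only [Sum.inl.injEq]; omega
      · rw [if_neg h2, if_neg (by omega)]
        simp only [Sum.inr.injEq, Prod.mk.injEq]
        refine ⟨by omega, by omega, by omega⟩

-- loop going left in nx (dx = -1, dy = 0)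
theorem loopA_left (x y : Int) : ∀ (n : Nat) (nx ny a : Int),
    loopA x y (-1) 0 n nx ny a =
      if y = ny ∧ nx - n ≤ x ∧ x < nx then Sum.inl (a + (nx - x))
      else Sum.inr (nx - n, ny, a + n) := by
  intro n
  induction n with
  | zero =>
    intro nx ny a
    simp only [loopA, Nat.cast_zero]
    rw [if_neg (by omega)]
    norm_num
  | succ n ih =>
    intro nx ny a
    simp only [loopA]
    by_cases h : y = ny + 0 ∧ x = nx + (-1)
    · rw [if_pos h, if_pos (by omega)]
      simp only [Sum.inl.injEq]; omega
    · rw [if_neg h, ih]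
      by_cases h2 : y = ny + 0 ∧ nx + (-1) - n ≤ x ∧ x < nx + (-1)
      · rw [if_pos h2, if_pos (by omega)]
        simp only [Sum.inl.injEq]; omega
      · rw [if_neg h2, if_neg (by omega)]
        simp only [Sum.inr.injEq, Prod.mk.injEq]
        refine ⟨by omega, by omega, by omega⟩

-- loop going up in ny (dx = 0, dy = 1)
theorem loopA_up (x y : Int) : ∀ (n : Nat) (nx ny a : Int),
    loopA x y 0 1 n nx ny a =
      if x = nx ∧ ny < y ∧ y ≤ ny + n then Sum.inl (a + (y - ny))
      else Sum.inr (nx, ny + n, a + n) := by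
  intro n
  induction n with
  | zero =>
    intro nx ny a
    simp only [loopA, Nat.cast_zero]
    rw [if_neg (by omega)]
    norm_num
  | succ n ih =>
    intro nx ny a
    simp only [loopA]
    by_cases h : y = ny + 1 ∧ x = nx + 0
    · rw [if_pos h, if_pos (by omega)]
      simp only [Sum.inl.injEq]; omega
    · rw [if_neg h, ih]
      by_cases h2 : x = nx + 0 ∧ ny + 1 < y ∧ y ≤ ny + 1 + n
      · rw [if_pos h2, if_pos (by omega)]
        simp only [Sum.inl.injEq]; omega
      · rw [if_neg h2, if_neg (by omega)]
        simp only [Sum.inr.injEq, Prod.mk.injEq]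
        refine ⟨by omega, by omega, by omega⟩

-- loop going right in nx (dx = 1, dy = 0)
theorem loopA_right (x y : Int) : ∀ (n : Nat) (nx ny a : Int),
    loopA x y 1 0 n nx ny a =
      if y = ny ∧ nx < x ∧ x ≤ nx + n then Sum.inl (a + (x - nx))
      else Sum.inr (nx + n, ny, a + n) := by
  intro n
  induction n with
  | zero =>
    intro nx ny a
    simp only [loopA, Nat.cast_zero]
    rw [if_neg (by omega)]
    norm_num
  | succ n ih =>
    intro nx ny a
    simp only [loopA]
    by_cases h : y = ny + 0 ∧ x = nx + 1
    · rw [if_pos h, if_pos (by omega)]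
      simp only [Sum.inl.injEq]; omega
    · rw [if_neg h, ih]
      by_cases h2 : y = ny + 0 ∧ nx + 1 < x ∧ x ≤ nx + 1 + n
      · rw [if_pos h2, if_pos (by omega)]
        simp only [Sum.inl.injEq]; omega
      · rw [if_neg h2, if_neg (by omega)]
        simp only [Sum.inr.injEq, Prod.mk.injEq]
        refine ⟨by omega, by omega, by omega⟩

-- ===== VERDICT (by name: the statement is the Claim_ definition above) =====
theorem f_spec : Claim_equal_f := by
  intro x y _
  unfold Spec_f f f_alt
  by_cases h0 : x = 0 ∧ y = 0
  · rw [if_pos h0, if_pos h0]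
  · rw [if_neg h0, if_neg h0]
    have hk0 : (0 : Int) ≤ max |x| |y| := le_trans (abs_nonneg x) (le_max_left _ _)
    have hxk := abs_le.mp (le_max_left |x| |y|)
    have hyk := abs_le.mp (le_max_right |x| |y|)
    set k : Int := max |x| |y| with hkdef
    have hk1 : 1 ≤ k := by omega
    have hon : x = k ∨ x = -k ∨ y = k ∨ y = -k := by
      rcases max_choice |x| |y| with h | h
      · rcases (abs_eq hk0).mp (by omega : |x| = k) with h' | h'
        · exact Or.inl h'
        · exact Or.inr (Or.inl h')
      · rcases (abs_eq hk0).mp (by omega : |y| = k) with h' | h'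
        · exact Or.inr (Or.inr (Or.inl h'))
        · exact Or.inr (Or.inr (Or.inr h'))
    have hcast : (((2 * k).toNat : Nat) : Int) = 2 * k := Int.toNat_of_nonneg (by omega)
    simp only [loopA_down, loopA_left, loopA_up, loopA_right, hcast]
    by_cases h1 : x = k ∧ k - 2 * k ≤ y ∧ y < k
    · rw [if_pos h1, Sum.elim_inl, id_eq, if_pos (show x = k ∧ y < k by omega)]
    · rw [if_neg h1, Sum.elim_inr, if_neg (show ¬(x = k ∧ y < k) by omega)]
      dsimp only
      by_cases h2 : y = k - 2 * k ∧ k - 2 * k ≤ x ∧ x < k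
      · rw [if_pos h2, Sum.elim_inl, id_eq, if_pos (show y = -k by omega)]
      · rw [if_neg h2, Sum.elim_inr, if_neg (show ¬y = -k by omega)]
        dsimp only
        by_cases h3 : x = k - 2 * k ∧ k - 2 * k < y ∧ y ≤ k - 2 * k + 2 * k
        · rw [if_pos h3, Sum.elim_inl, id_eq, if_pos (show x = -k by omega)]
          ring_nf
        · rw [if_neg h3, Sum.elim_inr]
          dsimp only
          rw [if_pos (show y = k - 2 * k + 2 * k ∧ k - 2 * k < x ∧ x ≤ k - 2 * k + 2 * k by omega),
            Sum.elim_inl, id_eq, if_neg (show ¬x = -k by omega)]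
          ring_nf
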